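-- pv_equiv track=rewrite | github.com/talkowski-lab/rCNV2 | analysis/genes/refine_significant_genes.py | get_cc_counts
-- ===== SOURCE A (Python) =====
-- def get_cc_counts(cohorts, case_hpos, control_hpos):
--     """
--     Parses per-cohort sample phenotypes to count effective cases and controls
--     """
--
--     def _count_samples(samples, hpos):
--         k = 0
--         for sample in samples:
--             for hpo in sample:
--                 if hpo in hpos:
--                     k += 1
--                     break
--         return k
--
--     cc_counts = {}
--
--     for cohort in cohorts.items():
--         n_case = _count_samples(cohort[1]['hpos'], case_hpos)
--         n_control = _count_samples(cohort[1]['hpos'], control_hpos)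
--         cc_counts[cohort[0]] = {'n_case' : n_case,
--                                 'n_control' : n_control}
--
--     return cc_counts
-- ===== SOURCE B (Python) =====
-- def get_cc_counts(cohorts, case_hpos, control_hpos):
--     """Single pass per cohort: one scan of each sample decides both the
--     case flag and the control flag, with early exit once both are set."""
--     cc_counts = {}
--     for name, info in cohorts.items():
--         n_case = 0
--         n_control = 0
--         for sample in info['hpos']:
--             found_case = False
--             found_control = False
--             for hpo in sample:
--                 found_case = found_case or hpo in case_hpos
--                 found_control = found_control or hpo in control_hpos
--                 if found_case and found_control:
--                     break
--             if found_case: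
--                 n_case += 1
--             if found_control:
--                 n_control += 1
--         cc_counts[name] = {'n_case': n_case, 'n_control': n_control}
--     return cc_counts
-- ===== Notes on version B (the rewrite author's own statement) =====
-- stated objective: alternative
-- what changed: Replaces the two independent helper scans (one per HPO set) over each cohort's samples with a single traversal that keeps two found-flags per sample, breaking once both are decided, and accumulates n_case/n_control together.
import Mathlib
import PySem

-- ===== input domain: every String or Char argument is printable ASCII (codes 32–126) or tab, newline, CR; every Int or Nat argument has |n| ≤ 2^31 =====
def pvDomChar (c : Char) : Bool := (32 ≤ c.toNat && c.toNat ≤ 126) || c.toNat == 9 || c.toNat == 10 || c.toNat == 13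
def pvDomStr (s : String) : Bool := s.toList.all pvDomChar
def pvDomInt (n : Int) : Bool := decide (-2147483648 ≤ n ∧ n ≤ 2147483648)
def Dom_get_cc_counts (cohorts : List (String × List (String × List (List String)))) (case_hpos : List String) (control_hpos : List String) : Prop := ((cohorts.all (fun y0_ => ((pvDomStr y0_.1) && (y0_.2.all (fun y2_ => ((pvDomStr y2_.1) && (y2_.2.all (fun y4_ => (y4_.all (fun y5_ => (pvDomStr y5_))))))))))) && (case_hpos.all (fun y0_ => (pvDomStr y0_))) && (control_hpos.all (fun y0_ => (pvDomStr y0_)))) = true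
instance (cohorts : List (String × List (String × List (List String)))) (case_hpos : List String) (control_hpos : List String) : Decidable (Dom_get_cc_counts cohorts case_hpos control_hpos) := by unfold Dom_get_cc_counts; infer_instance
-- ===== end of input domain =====

-- B merges A's two independent scans per cohort into one pass keeping two flags per sample (objective: alternative decomposition, same cost).
-- ===== PORT A =====
-- _count_samples: for each sample, scan its hpos, +1 and break on the first hit
def pvCountSamples (samples : List (List String)) (hpos : List String) : Int :=
  samples.foldl (fun k sample =>
    if (sample.find? (fun hpo => hpos.contains hpo)).isSome then k + 1 else k) 0

def get_cc_counts (cohorts : List (String × List (String × List (List String)))) (case_hpos : List String) (control_hpos : List String) : List (String × List (String × Int)) :=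
  (cohorts.foldl (fun cc cohort =>
      let n_case := pvCountSamples (((PySem.Dict.mk cohort.2).get? "hpos").getD []) case_hpos
      let n_control := pvCountSamples (((PySem.Dict.mk cohort.2).get? "hpos").getD []) control_hpos
      cc.insert cohort.1 [("n_case", n_case), ("n_control", n_control)])
    PySem.Dict.empty).items

-- ===== PORT B =====
-- inner loop of Source B: one scan of the sample, two flags, break once both are set
def pvScanFlags (case_hpos control_hpos : List String) : List String → Bool → Bool → Bool × Bool
  | [], fc, fk => (fc, fk)
  | hpo :: rest, fc, fk =>
    let fc' := fc || case_hpos.contains hpo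
    let fk' := fk || control_hpos.contains hpo
    if fc' && fk' then (fc', fk')
    else pvScanFlags case_hpos control_hpos rest fc' fk'

-- middle loop of Source B: accumulate (n_case, n_control) in a single traversal of the samples
def pvCountBoth (samples : List (List String)) (case_hpos control_hpos : List String) : Int × Int :=
  samples.foldl (fun nn sample =>
    let f := pvScanFlags case_hpos control_hpos sample false false
    ((if f.1 then nn.1 + 1 else nn.1), (if f.2 then nn.2 + 1 else nn.2))) (0, 0)

def get_cc_counts_alt (cohorts : List (String × List (String × List (List String)))) (case_hpos : List String) (control_hpos : List String) : List (String × List (String × Int)) :=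
  (cohorts.foldl (fun cc cohort =>
      let nn := pvCountBoth (((PySem.Dict.mk cohort.2).get? "hpos").getD []) case_hpos control_hpos
      cc.insert cohort.1 [("n_case", nn.1), ("n_control", nn.2)])
    PySem.Dict.empty).items

-- Pre_: Python A raises KeyError when a cohort's dict lacks the 'hpos' key; exactly those inputs are excluded.
def Pre_get_cc_counts (cohorts : List (String × List (String × List (List String)))) (case_hpos : List String) (control_hpos : List String) : Prop :=
  ∀ c ∈ cohorts, (PySem.Dict.mk c.2).contains "hpos" = true
instance (cohorts : List (String × List (String × List (List String)))) (case_hpos : List String) (control_hpos : List String) : Decidable (Pre_get_cc_counts cohorts case_hpos control_hpos) := by unfold Pre_get_cc_counts; infer_instance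

def pvWitness_get_cc_counts : (List (String × List (String × List (List String)))) × List String × List String :=
  ([("meta", [("hpos", [["HP:0000001"], ["HP:0000002", "HP:0000003"]])])], ["HP:0000001"], ["HP:0000003"])

-- ===== PRECONDITION & SPEC =====
def Spec_get_cc_counts (cohorts : List (String × List (String × List (List String)))) (case_hpos : List String) (control_hpos : List String) (out : List (String × List (String × Int))) : Prop := out = get_cc_counts_alt cohorts case_hpos control_hpos
instance (cohorts : List (String × List (String × List (List String)))) (case_hpos : List String) (control_hpos : List String) (out : List (String × List (String × Int))) : Decidable (Spec_get_cc_counts cohorts case_hpos control_hpos out) := by unfold Spec_get_cc_counts; infer_instance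

-- ===== CLAIM (what is proved, stated in full; the proofs are below) =====
def Claim_equal_get_cc_counts : Prop := ∀ (cohorts : List (String × List (String × List (List String)))) (case_hpos : List String) (control_hpos : List String), Dom_get_cc_counts cohorts case_hpos control_hpos → Pre_get_cc_counts cohorts case_hpos control_hpos → Spec_get_cc_counts cohorts case_hpos control_hpos (get_cc_counts cohorts case_hpos control_hpos)

-- ===== LEMMAS AND PROOFS =====

-- ===== VERDICT (by name: the statement is the Claim_ definition above) =====
theorem pvScanFlags_eq (ch kh : List String) (s : List String) :
    ∀ fc fk, pvScanFlags ch kh s fc fk = (fc || s.any ch.contains, fk || s.any kh.contains) := by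
  induction s with
  | nil => intro fc fk; simp [pvScanFlags]
  | cons h rest ih =>
    intro fc fk
    simp only [pvScanFlags, List.any_cons]
    split
    · rename_i hb
      rw [Bool.and_eq_true] at hb
      obtain ⟨h1, h2⟩ := hb
      simp only [Prod.mk.injEq]
      constructor
      · cases fc <;> cases hc : ch.contains h <;> simp_all
      · cases fk <;> cases hc : kh.contains h <;> simp_all
    · rw [ih]
      simp [Bool.or_assoc]

theorem pvFind?_isSome_eq_any {α : Type} (p : α → Bool) (l : List α) :
    (l.find? p).isSome = l.any p := by
  induction l with
  | nil => rfl
  | cons x xs ih => cases hp : p x <;> simp [List.find?, hp, ih]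

theorem pvCountBoth_aux (ch kh : List String) (s : List (List String)) :
    ∀ (a b : Int),
      s.foldl (fun nn sample =>
        let f := pvScanFlags ch kh sample false false
        ((if f.1 then nn.1 + 1 else nn.1), (if f.2 then nn.2 + 1 else nn.2))) (a, b)
      = (s.foldl (fun k sample => if (sample.find? (fun hpo => ch.contains hpo)).isSome then k + 1 else k) a,
         s.foldl (fun k sample => if (sample.find? (fun hpo => kh.contains hpo)).isSome then k + 1 else k) b) := by
  induction s with
  | nil => intro a b; rfl
  | cons smp tl ih =>
    intro a b
    simp only [List.foldl_cons, pvScanFlags_eq, pvFind?_isSome_eq_any, Bool.false_or] at ih ⊢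
    exact ih _ _

theorem pvCountBoth_eq (ch kh : List String) (s : List (List String)) :
    pvCountBoth s ch kh = (pvCountSamples s ch, pvCountSamples s kh) := by
  unfold pvCountBoth pvCountSamples
  exact pvCountBoth_aux ch kh s 0 0

theorem pvFoldl_cohorts_eq (ch kh : List String) (cohorts : List (String × List (String × List (List String)))) :
    ∀ (cc : PySem.Dict String (List (String × Int))),
      cohorts.foldl (fun cc cohort =>
        let n_case := pvCountSamples (((PySem.Dict.mk cohort.2).get? "hpos").getD []) ch
        let n_control := pvCountSamples (((PySem.Dict.mk cohort.2).get? "hpos").getD []) kh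
        cc.insert cohort.1 [("n_case", n_case), ("n_control", n_control)]) cc
      = cohorts.foldl (fun cc cohort =>
        let nn := pvCountBoth (((PySem.Dict.mk cohort.2).get? "hpos").getD []) ch kh
        cc.insert cohort.1 [("n_case", nn.1), ("n_control", nn.2)]) cc := by
  induction cohorts with
  | nil => intro cc; rfl
  | cons c rest ih =>
    intro cc
    simp only [List.foldl_cons, pvCountBoth_eq]

theorem get_cc_counts_spec : Claim_equal_get_cc_counts := by
  intro cohorts case_hpos control_hpos _ _
  unfold Spec_get_cc_counts get_cc_counts get_cc_counts_alt
  rw [pvFoldl_cohorts_eq]
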